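-- pv_equiv track=rewrite | github.com/Narawit-Oat/Data-scientist-with-codecademy | script.py | most_affected_area_function
-- ===== SOURCE A (Python) =====
-- def most_affected_area_function (affected_areas_dictionary):
--     area_list = []
--     area_count_list =[]
--     for i in affected_areas_dictionary:
--         area_list.append(i)
--         area_count_list.append(affected_areas_dictionary[i])
--     for j in range(0,len(area_count_list)):
--         if max(area_count_list) == area_count_list[j]:
--             max_area_count = area_count_list[j]
--             max_area = area_list[j]
--     return max_area,max_area_count
-- ===== SOURCE B (Python) =====
-- def most_affected_area_function(affected_areas_dictionary):
--     # stable ascending sort by count: the maximum-count entry that comes last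
--     # in insertion order ends up last; return it.
--     items = sorted(affected_areas_dictionary.items(), key=lambda kv: kv[1])
--     return items[-1]
-- ===== Notes on version B (the rewrite author's own statement) =====
-- stated objective: faster
-- what changed: Replaces the two accumulation loops plus an index loop that recomputes max(list) on every iteration with a single stable sort by count followed by taking the last item, which is the last-in-insertion-order maximum exactly as in A.
import Mathlib
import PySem

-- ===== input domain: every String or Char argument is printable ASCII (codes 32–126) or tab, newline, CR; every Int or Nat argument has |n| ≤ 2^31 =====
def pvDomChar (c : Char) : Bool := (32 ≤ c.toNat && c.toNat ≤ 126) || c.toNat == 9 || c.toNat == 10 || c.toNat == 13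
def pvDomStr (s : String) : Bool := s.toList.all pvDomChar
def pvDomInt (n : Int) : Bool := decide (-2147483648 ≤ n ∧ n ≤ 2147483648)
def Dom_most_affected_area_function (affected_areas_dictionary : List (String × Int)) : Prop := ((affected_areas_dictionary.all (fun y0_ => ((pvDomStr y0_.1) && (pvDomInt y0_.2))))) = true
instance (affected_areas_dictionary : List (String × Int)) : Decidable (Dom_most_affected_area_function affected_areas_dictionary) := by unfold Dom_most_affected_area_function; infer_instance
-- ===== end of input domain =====

-- B replaces A's two accumulation loops plus an index loop (which recomputes max() on
-- every iteration) by one stable ascending sort by count and taking the last item.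

-- ===== PORT A =====
def most_affected_area_function (affected_areas_dictionary : List (String × Int)) : String × Int :=
  let d := PySem.Dict.ofList affected_areas_dictionary
  -- area_list = [], area_count_list = []; for i in d: append i; append d[i]
  let lists := d.keys.foldl
      (fun (st : List String × List Int) i => (st.1 ++ [i], st.2 ++ [d.getD i 0])) ([], [])
  let area_list := lists.1
  let area_count_list := lists.2
  -- for j in range(0, len(area_count_list)): if max(area_count_list) == area_count_list[j]: …
  (PySem.List.pyRange 0 (area_count_list.length : Int) 1).foldl
    (fun (st : String × Int) j =>
      if (PySem.List.max? area_count_list (fun y => y)).getD 0 = PySem.List.pyGetD area_count_list j 0 then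
        (PySem.List.pyGetD area_list j "", PySem.List.pyGetD area_count_list j 0)
      else st)
    ("", 0)

-- ===== PORT B =====
def most_affected_area_function_alt (affected_areas_dictionary : List (String × Int)) : String × Int :=
  let items := PySem.List.sorted (PySem.Dict.ofList affected_areas_dictionary).items (fun kv => kv.2) false
  (PySem.List.pyGet? items (-1)).getD ("", 0)

-- ===== PRECONDITION & SPEC =====
-- Pre_ excludes only the empty dictionary, on which A raises UnboundLocalError (and B raises IndexError).
def Pre_most_affected_area_function (affected_areas_dictionary : List (String × Int)) : Prop :=
  affected_areas_dictionary ≠ []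
instance (affected_areas_dictionary : List (String × Int)) : Decidable (Pre_most_affected_area_function affected_areas_dictionary) := by unfold Pre_most_affected_area_function; infer_instance
def pvWitness_most_affected_area_function : (List (String × Int)) := [("a", 1)]

def Spec_most_affected_area_function (affected_areas_dictionary : List (String × Int)) (out : String × Int) : Prop := out = most_affected_area_function_alt affected_areas_dictionary
instance (affected_areas_dictionary : List (String × Int)) (out : String × Int) : Decidable (Spec_most_affected_area_function affected_areas_dictionary out) := by unfold Spec_most_affected_area_function; infer_instance

-- ===== CLAIM (what is proved, stated in full; the proofs are below) =====
def Claim_equal_most_affected_area_function : Prop := ∀ (affected_areas_dictionary : List (String × Int)), Dom_most_affected_area_function affected_areas_dictionary → Pre_most_affected_area_function affected_areas_dictionary → Spec_most_affected_area_function affected_areas_dictionary (most_affected_area_function affected_areas_dictionary)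

-- ===== LEMMAS AND PROOFS =====

-- A's first loop: appending to both lists in one pass builds the keys and their looked-up values.
theorem pvPairFold (g : String → Int) (l : List String) (as : List String) (bs : List Int) :
    l.foldl (fun (st : List String × List Int) i => (st.1 ++ [i], st.2 ++ [g i])) (as, bs)
      = (as ++ l, bs ++ l.map g) := by
  induction l generalizing as bs with
  | nil => simp
  | cons x t ih => simp [ih]

-- max of the projected list is the projection of the (first-extremal) max of the pairs.
theorem pvMaxMap (L : List (String × Int)) :
    PySem.List.max? (L.map Prod.snd) (fun y => y)
      = (PySem.List.max? L (fun p => p.2)).map Prod.snd := by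
  unfold PySem.List.max?
  rw [List.foldl_map]
  have hnone : (none : Option Int) = Option.map Prod.snd (none : Option (String × Int)) := rfl
  rw [hnone]
  apply List.foldl_hom
  intro a b
  cases a with
  | none => rfl
  | some m => by_cases hlt : m.2 < b.2 <;> simp [hlt]

-- xs[-1] is the last element.
theorem pvGetNegOne (xs : List (String × Int)) :
    PySem.List.pyGet? xs (-1) = xs.getLast? := by
  cases xs with
  | nil => simp [PySem.List.pyGet?, PySem.List.pyIdx?]
  | cons a t =>
      simp [PySem.List.pyGet?, PySem.List.pyIdx?, List.getLast?_eq_getElem?]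

-- A's index loop keeps the LAST element whose count equals m.
theorem pvFoldlFilterLast (L : List (String × Int)) (m : Int) (i : String × Int) :
    L.foldl (fun acc p => if m = p.2 then p else acc) i
      = ((L.filter (fun p => decide (m = p.2))).getLast?).getD i := by
  induction L using List.reverseRecOn with
  | nil => simp
  | append_singleton t x ih =>
      by_cases h : m = x.2 <;> simp [List.filter_append, h, ih]

-- inserting into a key-sorted list: the new last element.
theorem pvInsertByLast (x l : String × Int) (ys : List (String × Int))
    (hs : ys.Pairwise (fun a b => a.2 ≤ b.2)) (hl : ys.getLast? = some l) :
    (PySem.List.insertBy (fun a b => decide (a.2 < b.2)) x ys).getLast?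
      = some (if x.2 < l.2 then l else x) := by
  induction ys generalizing l with
  | nil => simp at hl
  | cons y t ih =>
      cases t with
      | nil =>
          simp at hl
          subst hl
          by_cases hxy : x.2 < y.2 <;> simp [PySem.List.insertBy, hxy]
      | cons b t' =>
          have hl' : (b :: t').getLast? = some l := by
            simpa [List.getLast?_cons_cons] using hl
          have hyall : ∀ z ∈ b :: t', y.2 ≤ z.2 := fun z hz => (List.pairwise_cons.mp hs).1 z hz
          have hst : (b :: t').Pairwise (fun a b => a.2 ≤ b.2) := (List.pairwise_cons.mp hs).2
          have hlm : l ∈ b :: t' := List.mem_of_getLast? hl'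
          by_cases hxy : x.2 < y.2
          · have hxl : x.2 < l.2 := lt_of_lt_of_le hxy (hyall l hlm)
            simp [PySem.List.insertBy, hxy, List.getLast?_cons_cons, hl', hxl]
          · have hrec := ih l hst hl'
            have hne : PySem.List.insertBy (fun a b => decide (a.2 < b.2)) x (b :: t') ≠ [] := by
              intro h0; rw [h0] at hrec; simp at hrec
            rw [show PySem.List.insertBy (fun a b => decide (a.2 < b.2)) x (y :: b :: t')
                = y :: PySem.List.insertBy (fun a b => decide (a.2 < b.2)) x (b :: t') from by
              simp [PySem.List.insertBy, hxy]]
            cases hzs : PySem.List.insertBy (fun a b => decide (a.2 < b.2)) x (b :: t') with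
            | nil => exact absurd hzs hne
            | cons c cs => rw [hzs] at hrec; rw [List.getLast?_cons_cons]; exact hrec

-- the last element of the stable ascending sort is the last max-count element.
theorem pvSortedLastFilter (L : List (String × Int)) (M : String × Int)
    (hM : PySem.List.max? L (fun p => p.2) = some M) :
    (PySem.List.sorted L (fun p => p.2) false).getLast?
      = (L.filter (fun p => decide (M.2 = p.2))).getLast? := by
  induction L using List.reverseRecOn generalizing M with
  | nil => simp [PySem.List.max?] at hM
  | append_singleton t x ih =>
      rw [PySem.List.sorted_eq_foldl_insertBy, List.foldl_append, List.foldl_cons, List.foldl_nil,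
        ← PySem.List.sorted_eq_foldl_insertBy]
      have hmemM := PySem.List.max?_mem hM
      have hmaxM := PySem.List.max?_isMax hM
      cases ht : PySem.List.max? t (fun p => p.2) with
      | none =>
          have htnil : t = [] := (PySem.List.max?_eq_none_iff _ _).mp ht
          subst htnil
          have hMx : M = x := by simpa using hmemM
          subst hMx
          simp [PySem.List.insertBy, PySem.List.sorted]
      | some m =>
          have hm_mem := PySem.List.max?_mem ht
          have hm_max := PySem.List.max?_isMax ht
          have htne : t ≠ [] := by
            intro h0; subst h0; simp [PySem.List.max?] at ht
          have hsne : PySem.List.sorted t (fun p => p.2) false ≠ [] := by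
            simpa [PySem.List.sorted_eq_nil_iff] using htne
          obtain ⟨l, hlast⟩ : ∃ l, (PySem.List.sorted t (fun p => p.2) false).getLast? = some l := by
            cases h : (PySem.List.sorted t (fun p => p.2) false).getLast? with
            | none => exact absurd (List.getLast?_eq_none_iff.mp h) hsne
            | some l => exact ⟨l, rfl⟩
          have hfl : (t.filter (fun p => decide (m.2 = p.2))).getLast? = some l := by
            rw [← ih m ht]; exact hlast
          have hl2 : l.2 = m.2 := by
            have hmem : l ∈ t.filter (fun p => decide (m.2 = p.2)) := List.mem_of_getLast? hfl
            have := (List.mem_filter.mp hmem).2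
            simp at this
            omega
          rw [pvInsertByLast x l _ (PySem.List.sorted_pairwise t (fun p => p.2)) hlast]
          rw [List.filter_append]
          have hxM : x.2 ≤ M.2 := hmaxM x (by simp)
          by_cases h1 : m.2 < x.2
          · have hM2 : M.2 = x.2 := by
              rcases List.mem_append.mp hmemM with hMt | hMx
              · have := hm_max M hMt; omega
              · simp at hMx; rw [hMx]
            have hfx : List.filter (fun p => decide (M.2 = p.2)) [x] = [x] := by simp [hM2]
            rw [hfx, List.getLast?_concat, if_neg (by omega : ¬ x.2 < l.2)]
          · have hmM : m.2 ≤ M.2 := hmaxM m (List.mem_append_left _ hm_mem)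
            have hM2 : M.2 = m.2 := by
              rcases List.mem_append.mp hmemM with hMt | hMx
              · have := hm_max M hMt; omega
              · simp at hMx; subst hMx; omega
            by_cases h2 : x.2 < m.2
            · have hfx : List.filter (fun p => decide (M.2 = p.2)) [x] = [] := by
                simp; omega
              have hft : List.filter (fun p => decide (M.2 = p.2)) t
                  = List.filter (fun p => decide (m.2 = p.2)) t := by rw [hM2]
              rw [hfx, List.append_nil, hft, hfl, if_pos (by omega : x.2 < l.2)]
            · have hx2 : x.2 = m.2 := by omega
              have hfx : List.filter (fun p => decide (M.2 = p.2)) [x] = [x] := by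
                simp; omega
              rw [hfx, if_neg (by omega : ¬ x.2 < l.2), List.getLast?_concat]

theorem pvContainsUpdate (ps : List (String × Int)) (d : PySem.Dict String Int) (k : String)
    (h : d.contains k = true) : (d.update ps).contains k = true := by
  induction ps generalizing d with
  | nil => exact h
  | cons p r ih =>
      have hstep : d.update (p :: r) = (d.insert p.1 p.2).update r := rfl
      rw [hstep]
      exact ih _ (by rw [PySem.Dict.contains_insert]; simp [h])

theorem pvItemsNeNil (xs : List (String × Int)) (h : xs ≠ []) :
    (PySem.Dict.ofList xs).items ≠ [] := by
  obtain ⟨p, rest, rfl⟩ : ∃ p rest, xs = p :: rest := by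
    cases xs with
    | nil => exact absurd rfl h
    | cons p rest => exact ⟨p, rest, rfl⟩
  intro h0
  have hc : (PySem.Dict.ofList (p :: rest)).contains p.1 = true := by
    have hstep : PySem.Dict.ofList (p :: rest)
        = (PySem.Dict.empty.insert p.1 p.2).update rest := rfl
    rw [hstep]
    exact pvContainsUpdate rest _ p.1 (PySem.Dict.contains_insert_self _ _ _)
  have hk := (PySem.Dict.contains_iff_mem_keys _ _).mp hc
  simp [PySem.Dict.keys, h0] at hk

-- the index loop over the two projected lists, as a fold over the item pairs.
theorem pvALoop (L : List (String × Int)) (m : Int) :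
    (PySem.List.pyRange 0 ((L.map Prod.snd).length : Int) 1).foldl
      (fun (st : String × Int) j =>
        if m = PySem.List.pyGetD (L.map Prod.snd) j 0 then
          (PySem.List.pyGetD (L.map Prod.fst) j "", PySem.List.pyGetD (L.map Prod.snd) j 0)
        else st) ("", 0)
      = L.foldl (fun acc p => if m = p.2 then p else acc) ("", 0) := by
  have h := PySem.List.foldl_pyRange_zero_pyGetD' L (("", (0 : Int)) : String × Int)
      (fun (acc : String × Int) p => if m = p.2 then p else acc) ("", 0)
  rw [List.length_map, ← h]
  apply List.foldl_ext
  intro acc j _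
  have h2 : PySem.List.pyGetD (L.map Prod.snd) j 0 = (PySem.List.pyGetD L j ("", 0)).2 := by
    simpa using PySem.List.pyGetD_map Prod.snd L j ("", 0)
  have h1 : PySem.List.pyGetD (L.map Prod.fst) j "" = (PySem.List.pyGetD L j ("", 0)).1 := by
    simpa using PySem.List.pyGetD_map Prod.fst L j ("", 0)
  rw [h1, h2]

-- ===== VERDICT (by name: the statement is the Claim_ definition above) =====
theorem most_affected_area_function_spec : Claim_equal_most_affected_area_function := by
  intro xs _ hpre
  unfold Spec_most_affected_area_function
  have hnodup := PySem.Dict.nodup_keys_ofList xs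
  have hitems : (PySem.Dict.ofList xs).items ≠ [] := pvItemsNeNil xs hpre
  obtain ⟨M, hM⟩ : ∃ M, PySem.List.max? (PySem.Dict.ofList xs).items (fun p => p.2) = some M := by
    cases h : PySem.List.max? (PySem.Dict.ofList xs).items (fun p => p.2) with
    | none => exact absurd ((PySem.List.max?_eq_none_iff _ _).mp h) hitems
    | some M => exact ⟨M, rfl⟩
  have hvals : (PySem.Dict.ofList xs).keys.map (fun i => (PySem.Dict.ofList xs).getD i 0)
      = (PySem.Dict.ofList xs).items.map Prod.snd := by
    rw [← PySem.Dict.values_eq_map_keys _ hnodup 0]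
    rfl
  have hkeys : (PySem.Dict.ofList xs).keys = (PySem.Dict.ofList xs).items.map Prod.fst := rfl
  simp only [most_affected_area_function, most_affected_area_function_alt]
  rw [pvPairFold (fun i => (PySem.Dict.ofList xs).getD i 0) (PySem.Dict.ofList xs).keys [] []]
  simp only [List.nil_append]
  rw [hvals, hkeys, pvMaxMap, hM]
  simp only [Option.map_some, Option.getD_some]
  refine Eq.trans (pvALoop (PySem.Dict.ofList xs).items M.2) ?_
  rw [pvFoldlFilterLast, pvGetNegOne, pvSortedLastFilter _ M hM]
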